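-- pv_equiv track=rewrite | github.com/OxQuasar/nous-memories | iching/relations/gl_maximization.py | factorizations
-- ===== SOURCE A (Python) =====
-- def is_prime_power(n):
--     """Return (p, k) if n = p^k for prime p, else None."""
--     if n < 2:
--         return None
--     for p in range(2, n + 1):
--         if n % p == 0:
--             k = 0
--             m = n
--             while m % p == 0:
--                 m //= p
--                 k += 1
--             if m == 1:
--                 return (p, k)
--             else:
--                 return None
--     return None
--
-- def factorizations(N):
--     """Find all (q, m) with q prime power, m ≥ 1, q^m = N."""
--     results = []
--     # Try all q from 2 up to N
--     q = 2
--     while q <= N: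
--         pp = is_prime_power(q)
--         if pp is not None:
--             # Check if N = q^m for some m ≥ 1
--             m = 0
--             val = 1
--             while val < N:
--                 val *= q
--                 m += 1
--             if val == N and m >= 1:
--                 results.append((q, m))
--         q += 1
--     return results
-- ===== SOURCE B (Python) =====
-- def factorizations(N):
--     """Find all (q, m) with q prime power, m >= 1, q^m = N."""
--     if N < 2:
--         return []
--     # smallest prime factor of N by trial division up to sqrt(N)
--     p = N
--     d = 2
--     while d * d <= N:
--         if N % d == 0:
--             p = d
--             break
--         d += 1
--     # extract the exponent of p in N
--     k = 0
--     m = N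
--     while m % p == 0:
--         m //= p
--         k += 1
--     if m != 1:
--         return []  # N is not a prime power
--     return [(p ** j, k // j) for j in range(1, k + 1) if k % j == 0]
-- ===== Notes on version B (the rewrite author's own statement) =====
-- stated objective: faster
-- what changed: Instead of scanning every q in [2, N] and running a trial-division prime-power check on each, B factors N once: trial division up to sqrt(N) finds the smallest prime factor p and the exponent k with N = p^k, and the answers are exactly (p^j, k/j) for the divisors j of k in increasing order.
import Mathlib
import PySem

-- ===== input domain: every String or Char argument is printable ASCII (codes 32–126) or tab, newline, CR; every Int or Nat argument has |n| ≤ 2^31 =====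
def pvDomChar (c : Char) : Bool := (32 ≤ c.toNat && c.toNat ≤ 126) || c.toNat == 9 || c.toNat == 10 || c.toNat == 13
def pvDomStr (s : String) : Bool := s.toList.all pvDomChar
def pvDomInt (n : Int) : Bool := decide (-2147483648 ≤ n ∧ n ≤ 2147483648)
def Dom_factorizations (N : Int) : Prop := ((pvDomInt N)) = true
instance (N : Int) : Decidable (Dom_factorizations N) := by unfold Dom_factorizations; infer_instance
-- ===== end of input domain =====

-- B replaces A's scan of every q in [2, N] by factoring N once: trial division to √N finds the
-- smallest prime factor p and exponent k with N = p^k, and the answers are (p^j, k/j) for j ∣ k.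

-- ===== PORT A =====
-- inner while of is_prime_power: while m % p == 0: m //= p; k += 1   (fuel bounds the iterations)
def pvDivOutA (p : Int) : Nat → Int → Int → Int × Int
  | 0, k, m => (k, m)
  | fuel+1, k, m =>
    if PySem.Int.mod m p = 0 then pvDivOutA p fuel (k+1) (PySem.Int.floordiv m p)
    else (k, m)

-- the for-loop of is_prime_power: the first p dividing n decides the result (both branches return)
def pvIppLoop (n : Int) : List Int → Option (Int × Int)
  | [] => none
  | p :: ps =>
    if PySem.Int.mod n p = 0 then
      let km := pvDivOutA p n.toNat 0 n
      if km.2 = 1 then some (p, km.1) else none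
    else pvIppLoop n ps

def pvIsPrimePower (n : Int) : Option (Int × Int) :=
  if n < 2 then none
  else pvIppLoop n (PySem.List.pyRange 2 (n+1) 1)

-- while val < N: val *= q; m += 1
def pvPowLoopA (N q : Int) : Nat → Int → Int → Int × Int
  | 0, m, val => (m, val)
  | fuel+1, m, val =>
    if val < N then pvPowLoopA N q fuel (m+1) (val*q) else (m, val)

def factorizations (N : Int) : List (Int × Int) :=
  (PySem.List.pyRange 2 (N+1) 1).foldl (fun results q =>
    match pvIsPrimePower q with
    | some _ =>
      let mv := pvPowLoopA N q N.toNat 0 1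
      if mv.2 = N ∧ 1 ≤ mv.1 then results ++ [(q, mv.1)] else results
    | none => results) []

-- ===== PORT B =====
-- while d*d <= N: if N % d == 0: p = d; break; d += 1   (p stays N when no divisor is found)
def pvSpfLoop (N : Int) : Nat → Int → Int
  | 0, _ => N
  | fuel+1, d =>
    if d*d ≤ N then
      if PySem.Int.mod N d = 0 then d else pvSpfLoop N fuel (d+1)
    else N

-- B's exponent-extraction loop: while m % p == 0: m //= p; k += 1
def pvExtractB (p : Int) : Nat → Int → Int → Int × Int
  | 0, k, m => (k, m)
  | fuel+1, k, m =>
    if PySem.Int.mod m p = 0 then pvExtractB p fuel (k+1) (PySem.Int.floordiv m p)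
    else (k, m)

def factorizations_alt (N : Int) : List (Int × Int) :=
  if N < 2 then []
  else
    let p := pvSpfLoop N N.toNat 2
    let km := pvExtractB p N.toNat 0 N
    if km.2 ≠ 1 then []
    else
      ((PySem.List.pyRange 1 (km.1+1) 1).filter (fun j => PySem.Int.mod km.1 j = 0)).map
        (fun j => (p ^ j.toNat, PySem.Int.floordiv km.1 j))

-- ===== PRECONDITION & SPEC =====
def Spec_factorizations (N : Int) (out : List (Int × Int)) : Prop := out = factorizations_alt N
instance (N : Int) (out : List (Int × Int)) : Decidable (Spec_factorizations N out) := by unfold Spec_factorizations; infer_instance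

-- ===== CLAIM (what is proved, stated in full; the proofs are below) =====
def Claim_equal_factorizations : Prop := ∀ (N : Int), Dom_factorizations N → Spec_factorizations N (factorizations N)

-- ===== LEMMAS AND PROOFS =====

-- the Boolean test A's accumulator step applies to each q
def pvCondA (N q : Int) : Bool :=
  (pvIsPrimePower q).isSome &&
    decide ((pvPowLoopA N q N.toNat 0 1).2 = N ∧ 1 ≤ (pvPowLoopA N q N.toNat 0 1).1)

lemma factorizations_eq_filter_map (N : Int) :
    factorizations N =
      ((PySem.List.pyRange 2 (N+1) 1).filter (pvCondA N)).map
        (fun q => (q, (pvPowLoopA N q N.toNat 0 1).1)) := by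
  have hfun : (fun (results : List (Int × Int)) (q : Int) =>
      match pvIsPrimePower q with
      | some _ =>
        let mv := pvPowLoopA N q N.toNat 0 1
        if mv.2 = N ∧ 1 ≤ mv.1 then results ++ [(q, mv.1)] else results
      | none => results) =
      (fun (acc : List (Int × Int)) (q : Int) =>
        if pvCondA N q then acc ++ [(q, (pvPowLoopA N q N.toNat 0 1).1)] else acc) := by
    funext acc q
    cases h : pvIsPrimePower q with
    | none => simp [pvCondA, h]
    | some v =>
      by_cases hc : (pvPowLoopA N q N.toNat 0 1).2 = N ∧ 1 ≤ (pvPowLoopA N q N.toNat 0 1).1 <;>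
        simp [pvCondA, h, hc]
  unfold factorizations
  rw [hfun, PySem.List.foldl_append_if]
  simp

-- divisibility of positives transfers to toNat and back
lemma dvd_toNat_of_dvd {c N : Int} (hc : 0 < c) (hN : 0 < N) (h : c ∣ N) : c.toNat ∣ N.toNat := by
  rcases h with ⟨x, hx⟩
  have hx0 : 0 ≤ x := by nlinarith
  refine ⟨x.toNat, ?_⟩
  have h' : (N.toNat : Int) = (c.toNat : Int) * (x.toNat : Int) := by
    rw [Int.toNat_of_nonneg (by omega), Int.toNat_of_nonneg (by omega), Int.toNat_of_nonneg hx0]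
    exact hx
  exact_mod_cast h'

lemma dvd_of_dvd_toNat {c N : Int} (hc : 0 ≤ c) (hN : 0 ≤ N) (h : c.toNat ∣ N.toNat) : c ∣ N := by
  rcases h with ⟨x, hx⟩
  refine ⟨(x : Int), ?_⟩
  have h' : ((N.toNat : Nat) : Int) = ((c.toNat * x : Nat) : Int) := by
    exact_mod_cast congrArg (Nat.cast (R := Int)) hx
  push_cast at h'
  rw [Int.toNat_of_nonneg hN, Int.toNat_of_nonneg hc] at h'
  exact h'

-- pvDivOutA extracts the full power of p: m = p^e * r with p not dividing r
lemma divOutA_spec (p : Int) (hp : 2 ≤ p) :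
    ∀ (fuel : Nat) (k0 m : Int), 0 < m → m.toNat ≤ fuel →
    ∃ (e : Nat) (r : Int), pvDivOutA p fuel k0 m = (k0 + e, r) ∧ m = p ^ e * r ∧ 0 < r ∧ ¬ (p ∣ r) := by
  intro fuel
  induction fuel with
  | zero => intro k0 m hm hf; omega
  | succ f ih =>
    intro k0 m hm hf
    by_cases hdvd : p ∣ m
    · have hmod : PySem.Int.mod m p = 0 := (PySem.Int.mod_eq_zero_iff_dvd m p).2 hdvd
      have hfd : PySem.Int.floordiv m p = m / p := PySem.Int.floordiv_eq_ediv_of_pos (by omega)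
      obtain ⟨c, hc⟩ := hdvd
      have hcdiv : m / p = c := by rw [hc, Int.mul_ediv_cancel_left _ (by omega : p ≠ 0)]
      have hcpos : 0 < c := by nlinarith
      have hclt : c < m := by nlinarith
      obtain ⟨e, r, heq, hfac, hr0, hnd⟩ := ih (k0 + 1) c (by omega) (by omega)
      refine ⟨e + 1, r, ?_, ?_, hr0, hnd⟩
      · have hstep : pvDivOutA p (f+1) k0 m = pvDivOutA p f (k0+1) c := by
          simp [pvDivOutA, hmod, hfd, hcdiv]
        rw [hstep, heq, Prod.mk.injEq]
        exact ⟨by omega, rfl⟩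
      · rw [hc, hfac]; ring
    · have hmod : ¬ PySem.Int.mod m p = 0 := fun h => hdvd ((PySem.Int.mod_eq_zero_iff_dvd m p).1 h)
      refine ⟨0, m, ?_, by simp, hm, hdvd⟩
      simp [pvDivOutA, hmod]

lemma extractB_eq_divOutA (p : Int) : ∀ (fuel : Nat) (k m : Int),
    pvExtractB p fuel k m = pvDivOutA p fuel k m := by
  intro fuel
  induction fuel with
  | zero => intro k m; rfl
  | succ f ih =>
    intro k m
    simp only [pvExtractB, pvDivOutA]
    split <;> simp [ih]

-- cancellation: the (exponent, cofactor) decomposition along p is unique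
lemma pow_mul_unique {p : Int} (hp : 2 ≤ p) {e e' : Nat} {r r' : Int}
    (h : p ^ e * r = p ^ e' * r') (hr : ¬ p ∣ r) (hr' : ¬ p ∣ r') : e = e' ∧ r = r' := by
  have hp0 : p ≠ 0 := by omega
  have key : ∀ (a b : Nat) (x y : Int), p ^ a * x = p ^ b * y → ¬ p ∣ x → a ≤ b → a = b := by
    intro a b x y hxy hx hab
    by_contra hne
    have hlt : a < b := lt_of_le_of_ne hab hne
    have hb : p ^ b = p ^ a * p ^ (b - a) := by rw [← pow_add]; congr 1; omega
    rw [hb, mul_assoc] at hxy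
    have hx' : x = p ^ (b - a) * y := mul_left_cancel₀ (pow_ne_zero a hp0) hxy
    exact hx (hx' ▸ Dvd.dvd.mul_right (dvd_pow_self p (by omega)) y)
  rcases le_total e e' with hle | hle
  · have he := key e e' r r' h hr hle
    subst he
    exact ⟨rfl, mul_left_cancel₀ (pow_ne_zero e hp0) h⟩
  · have he := key e' e r' r h.symm hr' hle
    subst he
    exact ⟨rfl, mul_left_cancel₀ (pow_ne_zero e' hp0) h⟩

-- pvPowLoopA finds the least exponent with q^e >= N
lemma powLoopA_spec (N q : Int) :
    ∀ (fuel m0 : Nat), N ≤ q ^ (m0 + fuel) →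
    ∃ e : Nat, pvPowLoopA N q fuel (m0 : Int) (q ^ m0) = (((m0 + e : Nat) : Int), q ^ (m0 + e)) ∧
      N ≤ q ^ (m0 + e) ∧ ∀ i : Nat, m0 ≤ i → i < m0 + e → q ^ i < N := by
  intro fuel
  induction fuel with
  | zero =>
    intro m0 hN
    exact ⟨0, by simp [pvPowLoopA], by simpa using hN, by omega⟩
  | succ f ih =>
    intro m0 hN
    by_cases hlt : q ^ m0 < N
    · obtain ⟨e, heq, hge, hmin⟩ := ih (m0 + 1)
        (by rw [show m0 + 1 + f = m0 + (f+1) by omega]; exact hN)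
      refine ⟨e + 1, ?_, ?_, ?_⟩
      · have hstep : pvPowLoopA N q (f+1) (m0 : Int) (q ^ m0) = pvPowLoopA N q f ((m0:Int)+1) (q ^ m0 * q) := by
          simp [pvPowLoopA, hlt]
        rw [hstep, show ((m0:Int)+1) = ((m0+1 : Nat) : Int) by push_cast; ring,
            show q ^ m0 * q = q ^ (m0+1) by ring, heq]
        rw [show m0 + 1 + e = m0 + (e + 1) by omega]
      · rw [show m0 + (e+1) = m0 + 1 + e by omega]; exact hge
      · intro i h1 h2
        rcases Nat.eq_or_lt_of_le h1 with h | h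
        · rw [← h]; exact hlt
        · exact hmin i (by omega) (by omega)
    · exact ⟨0, by simp [pvPowLoopA, hlt], by simpa using not_lt.mp hlt, by omega⟩

lemma powLoopA_eval (N q : Int) (hq : 2 ≤ q) (hN : 2 ≤ N) :
    ∃ e : Nat, pvPowLoopA N q N.toNat 0 1 = ((e : Int), q ^ e) ∧
      N ≤ q ^ e ∧ ∀ i : Nat, i < e → q ^ i < N := by
  have hbig : N ≤ q ^ (0 + N.toNat) := by
    calc N = (N.toNat : Int) := by omega
    _ ≤ ((2:Int)) ^ N.toNat := by
        have := Nat.lt_two_pow_self (n := N.toNat)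
        exact_mod_cast this.le
    _ ≤ q ^ (0 + N.toNat) := by
        rw [Nat.zero_add]
        exact pow_le_pow_left₀ (by omega) hq N.toNat
  obtain ⟨e, heq, hge, hmin⟩ := powLoopA_spec N q N.toNat 0 hbig
  refine ⟨e, ?_, by simpa using hge, fun i hi => hmin i (by omega) (by omega)⟩
  simpa using heq

lemma powLoopA_of_pow_eq {N q : Int} (hq : 2 ≤ q) (hN : 2 ≤ N) {j : Nat} (hj : q ^ j = N) :
    pvPowLoopA N q N.toNat 0 1 = ((j : Int), N) := by
  obtain ⟨e, heq, hge, hmin⟩ := powLoopA_eval N q hq hN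
  have hej : e = j := by
    rcases Nat.lt_trichotomy e j with h | h | h
    · have : q ^ e < q ^ j := pow_lt_pow_right₀ (by omega) h
      omega
    · exact h
    · have := hmin j h
      omega
  subst hej
  rw [heq, hj]

-- the condition A tests after the power loop holds iff N is a power of q
lemma powCond_iff {N q : Int} (hq : 2 ≤ q) (hN : 2 ≤ N) :
    ((pvPowLoopA N q N.toNat 0 1).2 = N ∧ 1 ≤ (pvPowLoopA N q N.toNat 0 1).1) ↔
      ∃ j : Nat, 1 ≤ j ∧ q ^ j = N := by
  constructor
  · rintro ⟨h2, h1⟩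
    obtain ⟨e, heq, hge, hmin⟩ := powLoopA_eval N q hq hN
    refine ⟨e, ?_, ?_⟩
    · rw [heq] at h1; simp at h1; omega
    · rw [heq] at h2; exact h2
  · rintro ⟨j, hj1, hj⟩
    rw [powLoopA_of_pow_eq hq hN hj]
    exact ⟨rfl, by simp; exact_mod_cast hj1⟩

lemma minFac_eq_of_first_div {N d : Int} (hN : 2 ≤ N) (hd : 2 ≤ d) (hdvd : d ∣ N)
    (hmin : ∀ c : Int, 2 ≤ c → c < d → ¬ (c ∣ N)) : d = ((N.toNat.minFac : Nat) : Int) := by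
  have h1 : N.toNat.minFac ≤ d.toNat :=
    Nat.minFac_le_of_dvd (by omega) (dvd_toNat_of_dvd (by omega) (by omega) hdvd)
  have h2 : 2 ≤ N.toNat.minFac := (Nat.minFac_prime (by omega : N.toNat ≠ 1)).two_le
  have h3 : (N.toNat.minFac : Int) ∣ N := by
    apply dvd_of_dvd_toNat (by omega) (by omega)
    simpa using Nat.minFac_dvd N.toNat
  by_contra hne
  exact hmin _ (by omega) (by omega) h3

lemma spfLoop_spec (N : Int) (hN : 2 ≤ N) :
    ∀ (fuel : Nat) (d : Int), 2 ≤ d → (∀ c : Int, 2 ≤ c → c < d → ¬ (c ∣ N)) → N < d + fuel →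
    pvSpfLoop N fuel d = ((N.toNat.minFac : Nat) : Int) := by
  intro fuel
  induction fuel with
  | zero =>
    intro d hd hmin hlt
    exact absurd dvd_rfl (hmin N hN (by omega))
  | succ f ih =>
    intro d hd hmin hlt
    by_cases hsq : d*d ≤ N
    · by_cases hdvd : d ∣ N
      · have hmod : PySem.Int.mod N d = 0 := (PySem.Int.mod_eq_zero_iff_dvd N d).2 hdvd
        have hstep : pvSpfLoop N (f+1) d = d := by
          simp [pvSpfLoop, hsq, hmod]
        rw [hstep]
        exact minFac_eq_of_first_div hN hd hdvd hmin
      · have hmod : ¬ PySem.Int.mod N d = 0 := fun h => hdvd ((PySem.Int.mod_eq_zero_iff_dvd N d).1 h)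
        have hstep : pvSpfLoop N (f+1) d = pvSpfLoop N f (d+1) := by
          simp [pvSpfLoop, hsq, hmod]
        rw [hstep]
        apply ih (d+1) (by omega) _ (by omega)
        intro c h2 hcd
        rcases lt_or_eq_of_le (by omega : c ≤ d) with h | h
        · exact hmin c h2 h
        · rw [h]; exact hdvd
    · simp only [pvSpfLoop, if_neg hsq]
      have hprime : N.toNat.Prime := by
        rw [Nat.prime_def_le_sqrt]
        refine ⟨by omega, ?_⟩
        intro m h2 hsqrt hmdvd
        have hmm : m * m ≤ N.toNat := Nat.le_sqrt.mp hsqrt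
        have hmN : (m : Int) ∣ N := dvd_of_dvd_toNat (by omega) (by omega) (by simpa using hmdvd)
        by_cases hmd : (m : Int) < d
        · exact hmin m (by exact_mod_cast h2) hmd hmN
        · rw [not_lt] at hmd
          have hdm : d * d ≤ (m : Int) * m := by nlinarith
          have h2' : ((m*m : Nat) : Int) ≤ ((N.toNat : Nat) : Int) := by exact_mod_cast hmm
          push_cast at h2'
          have h3' : ((N.toNat : Nat) : Int) = N := Int.toNat_of_nonneg (by omega)
          linarith
      rw [hprime.minFac_eq]
      omega

lemma spfLoop_eval (N : Int) (hN : 2 ≤ N) :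
    pvSpfLoop N N.toNat 2 = ((N.toNat.minFac : Nat) : Int) := by
  apply spfLoop_spec N hN N.toNat 2 (by omega) _ (by omega)
  intro c h2 hc
  omega

-- the scan inside is_prime_power stops exactly at the least prime factor
lemma ippLoop_spec (n : Int) (hn : 2 ≤ n) :
    ∀ (k : Nat) (d : Int), 2 ≤ d → d ≤ ((n.toNat.minFac : Nat) : Int) →
      (((n.toNat.minFac : Nat) : Int) - d).toNat = k →
    pvIppLoop n (PySem.List.pyRange d (n+1) 1) =
      (let km := pvDivOutA ((n.toNat.minFac : Nat) : Int) n.toNat 0 n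
       if km.2 = 1 then some (((n.toNat.minFac : Nat) : Int), km.1) else none) := by
  have hMn : ((n.toNat.minFac : Nat) : Int) ≤ n := by
    have := Nat.minFac_le (show 0 < n.toNat by omega)
    omega
  have hMdvd : ((n.toNat.minFac : Nat) : Int) ∣ n := by
    apply dvd_of_dvd_toNat (by omega) (by omega)
    simpa using Nat.minFac_dvd n.toNat
  intro k
  induction k with
  | zero =>
    intro d hd hdM hk
    have hdM' : d = ((n.toNat.minFac : Nat) : Int) := by omega
    subst hdM'
    rw [PySem.List.pyRange_one_cons (by omega)]
    simp only [pvIppLoop]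
    rw [if_pos ((PySem.Int.mod_eq_zero_iff_dvd _ _).2 hMdvd)]
  | succ k ih =>
    intro d hd hdM hk
    have hdlt : d < ((n.toNat.minFac : Nat) : Int) := by omega
    have hdnd : ¬ (d ∣ n) := by
      intro hdvd
      have := Nat.minFac_le_of_dvd (by omega : 2 ≤ d.toNat)
        (dvd_toNat_of_dvd (by omega) (by omega) hdvd)
      omega
    rw [PySem.List.pyRange_one_cons (by omega)]
    simp only [pvIppLoop]
    rw [if_neg (fun h => hdnd ((PySem.Int.mod_eq_zero_iff_dvd _ _).1 h))]
    exact ih (d+1) (by omega) (by omega) (by omega)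

lemma isPrimePower_eval (n : Int) (hn : 2 ≤ n) :
    pvIsPrimePower n =
      (let km := pvDivOutA ((n.toNat.minFac : Nat) : Int) n.toNat 0 n
       if km.2 = 1 then some (((n.toNat.minFac : Nat) : Int), km.1) else none) := by
  have hM2 : 2 ≤ ((n.toNat.minFac : Nat) : Int) := by
    have := (Nat.minFac_prime (show n.toNat ≠ 1 by omega)).two_le
    omega
  unfold pvIsPrimePower
  rw [if_neg (by omega : ¬ n < 2)]
  exact ippLoop_spec n hn _ 2 (by omega) hM2 rfl

-- the least prime factor of a prime power is its base
lemma minFac_of_eq_pow {n : Int} {P K : Nat} (hP : P.Prime) (hK : 1 ≤ K) (hn : n = (P : Int) ^ K) :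
    n.toNat.minFac = P := by
  have hP2 : (2:Int) ≤ (P:Int) := by exact_mod_cast hP.two_le
  have hn2 : (2:Int) ≤ n := by
    rw [hn]
    calc (2:Int) ≤ (P:Int) := hP2
    _ = (P:Int)^1 := (pow_one _).symm
    _ ≤ (P:Int)^K := pow_le_pow_right₀ (by omega) hK
  have hnt : n.toNat = P ^ K := by
    have h1 : (n.toNat : Int) = ((P^K : Nat) : Int) := by
      rw [Int.toNat_of_nonneg (by omega)]
      push_cast
      exact hn
    exact_mod_cast h1
  have hmp := Nat.minFac_prime (show n.toNat ≠ 1 by omega)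
  have hd0 := Nat.minFac_dvd n.toNat
  nth_rewrite 2 [hnt] at hd0
  exact (Nat.prime_dvd_prime_iff_eq hmp hP).1 (hmp.dvd_of_dvd_pow hd0)

-- a prime power is recognised, with its base and exponent
lemma ipp_of_eq_pow {n : Int} {P K : Nat} (hP : P.Prime) (hK : 1 ≤ K) (hn : n = (P : Int) ^ K) :
    pvIsPrimePower n = some ((P : Int), (K : Int)) := by
  have hP2 : (2:Int) ≤ (P:Int) := by exact_mod_cast hP.two_le
  have hn2 : (2:Int) ≤ n := by
    rw [hn]
    calc (2:Int) ≤ (P:Int) := hP2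
    _ = (P:Int)^1 := (pow_one _).symm
    _ ≤ (P:Int)^K := pow_le_pow_right₀ (by omega) hK
  have hmf : n.toNat.minFac = P := minFac_of_eq_pow hP hK hn
  obtain ⟨e, r, heq, hfac, hr0, hnd⟩ := divOutA_spec ((n.toNat.minFac : Nat) : Int)
      (by rw [hmf]; exact hP2) n.toNat 0 n (by omega) le_rfl
  have hone : ¬ (((n.toNat.minFac : Nat) : Int) ∣ (1:Int)) := by
    intro hd
    have h1 := Int.le_of_dvd one_pos hd
    rw [hmf] at h1
    omega
  obtain ⟨heK, hr1⟩ := pow_mul_unique (p := ((n.toNat.minFac : Nat) : Int))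
      (by rw [hmf]; exact hP2) (e := e) (e' := K) (r := r) (r' := 1)
      (by conv_lhs => rw [← hfac]
          rw [hmf, hn, mul_one]) hnd hone
  subst heK
  subst hr1
  rw [isPrimePower_eval n hn2]
  simp only [heq]
  simp [hmf]

-- whatever is recognised is a prime power
lemma ipp_some_elim {n p k : Int} (hn : 2 ≤ n) (h : pvIsPrimePower n = some (p, k)) :
    ∃ (P K : Nat), P.Prime ∧ 1 ≤ K ∧ p = (P : Int) ∧ k = (K : Int) ∧ n = (P : Int) ^ K := by
  have hM2 : 2 ≤ ((n.toNat.minFac : Nat) : Int) := by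
    have := (Nat.minFac_prime (show n.toNat ≠ 1 by omega)).two_le
    omega
  obtain ⟨e, r, heq, hfac, hr0, hnd⟩ := divOutA_spec _ hM2 n.toNat 0 n (by omega) le_rfl
  rw [isPrimePower_eval n hn] at h
  simp only [heq] at h
  by_cases hr : r = 1
  · subst hr
    simp at h
    obtain ⟨hp', hk⟩ := h
    have he1 : 1 ≤ e := by
      rcases Nat.eq_zero_or_pos e with h0 | h1
      · rw [h0] at hfac; simp at hfac; omega
      · exact h1
    refine ⟨n.toNat.minFac, e, Nat.minFac_prime (by omega), he1, hp'.symm, ?_, ?_⟩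
    · omega
    · conv_lhs => rw [hfac]
      rw [mul_one]
  · simp [hr] at h

-- the main membership equivalence, N = P^K
lemma filter_eq_powers {N : Int} {P K : Nat} (hN : 2 ≤ N) (hP : P.Prime) (hK : 1 ≤ K)
    (hNP : N = (P : Int) ^ K) :
    (PySem.List.pyRange 2 (N+1) 1).filter (pvCondA N) =
      ((PySem.List.pyRange 1 ((K : Int)+1) 1).filter
        (fun j => PySem.Int.mod (K : Int) j = 0)).map (fun j => (P : Int) ^ j.toNat) := by
  have hP2 : (2:Int) ≤ (P:Int) := by exact_mod_cast hP.two_le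
  have hmem : ∀ x : Int,
      (x ∈ (PySem.List.pyRange 2 (N+1) 1).filter (pvCondA N)) ↔
      (x ∈ ((PySem.List.pyRange 1 ((K : Int)+1) 1).filter
        (fun j => PySem.Int.mod (K : Int) j = 0)).map (fun j => (P : Int) ^ j.toNat)) := by
    intro x
    rw [List.mem_filter, PySem.List.mem_pyRange_one, List.mem_map]
    constructor
    · rintro ⟨⟨hx2, hxN⟩, hcond⟩
      rw [pvCondA, Bool.and_eq_true] at hcond
      obtain ⟨hsome, hdec⟩ := hcond
      rw [Option.isSome_iff_exists] at hsome
      obtain ⟨⟨pp, kk⟩, hpk⟩ := hsome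
      obtain ⟨Q, a, hQ, ha1, hpQ, hka, hxQ⟩ := ipp_some_elim hx2 hpk
      obtain ⟨j, hj1, hj⟩ := (powCond_iff hx2 hN).1 (of_decide_eq_true hdec)
      have hpow : (Q:Int) ^ (a * j) = (P:Int) ^ K := by
        rw [pow_mul, ← hxQ, hj, hNP]
      have hpowN : Q ^ (a*j) = P ^ K := by exact_mod_cast hpow
      have hQP : Q = P := by
        have hd : Q ∣ P ^ K := hpowN ▸ dvd_pow_self Q (by positivity)
        exact (Nat.prime_dvd_prime_iff_eq hQ hP).1 (hQ.dvd_of_dvd_pow hd)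
      subst hQP
      have hajK : a * j = K := Nat.pow_right_injective hQ.two_le hpowN
      have haK : a ≤ K := by
        calc a = a * 1 := (mul_one a).symm
        _ ≤ a * j := Nat.mul_le_mul_left a hj1
        _ = K := hajK
      refine ⟨(a : Int), ?_, ?_⟩
      · rw [List.mem_filter, PySem.List.mem_pyRange_one]
        refine ⟨⟨by exact_mod_cast ha1, by exact_mod_cast Nat.lt_succ_of_le haK⟩, ?_⟩
        rw [decide_eq_true_iff, PySem.Int.mod_eq_zero_iff_dvd]
        exact Int.natCast_dvd_natCast.2 ⟨j, hajK.symm⟩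
      · rw [Int.toNat_natCast]
        exact hxQ.symm
    · rintro ⟨jj, hjmem, hjx⟩
      rw [List.mem_filter, PySem.List.mem_pyRange_one] at hjmem
      obtain ⟨⟨hj1, hjK⟩, hjdvd⟩ := hjmem
      have hdvdI : jj ∣ (K:Int) :=
        (PySem.Int.mod_eq_zero_iff_dvd _ _).1 (of_decide_eq_true hjdvd)
      have hK0 : (0:Int) < (K:Int) := lt_of_lt_of_le zero_lt_one (by exact_mod_cast hK)
      have hdvdN : jj.toNat ∣ K := by
        have := dvd_toNat_of_dvd (by omega) hK0 hdvdI
        simpa using this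
      have ha1 : 1 ≤ jj.toNat := by omega
      have haK : jj.toNat ≤ K := Nat.le_of_dvd (by omega) hdvdN
      have hx2 : (2:Int) ≤ (P:Int) ^ jj.toNat := by
        calc (2:Int) ≤ (P:Int) := hP2
        _ = (P:Int)^1 := (pow_one _).symm
        _ ≤ (P:Int)^jj.toNat := pow_le_pow_right₀ (by omega) ha1
      subst hjx
      refine ⟨⟨hx2, ?_⟩, ?_⟩
      · have hle : (P:Int)^jj.toNat ≤ (P:Int)^K := pow_le_pow_right₀ (by omega) haK
        omega
      · rw [pvCondA, Bool.and_eq_true]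
        constructor
        · rw [ipp_of_eq_pow hP ha1 rfl]
          rfl
        · rw [decide_eq_true_iff]
          apply (powCond_iff hx2 hN).2
          refine ⟨K / jj.toNat, (Nat.one_le_div_iff (by omega)).2 haK, ?_⟩
          rw [← pow_mul, Nat.mul_div_cancel' hdvdN, hNP]
  have hp1 : ((PySem.List.pyRange 2 (N+1) 1).filter (pvCondA N)).Pairwise (· < ·) :=
    (PySem.List.pairwise_lt_pyRange_one 2 (N+1)).filter _
  have hp2 : (((PySem.List.pyRange 1 ((K : Int)+1) 1).filter
      (fun j => PySem.Int.mod (K : Int) j = 0)).map (fun j => (P : Int) ^ j.toNat)).Pairwise (· < ·) := by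
    rw [List.pairwise_map]
    refine List.Pairwise.imp_of_mem ?_ ((PySem.List.pairwise_lt_pyRange_one 1 ((K:Int)+1)).filter _)
    intro a b hamem hbmem hab
    have ha1 : 1 ≤ a := ((PySem.List.mem_pyRange_one).1 (List.mem_of_mem_filter hamem)).1
    exact pow_lt_pow_right₀ (by omega : 1 < (P:Int)) (by omega : a.toNat < b.toNat)
  have hperm := (List.perm_ext_iff_of_nodup (hp1.imp ne_of_lt) (hp2.imp ne_of_lt)).2 hmem
  exact hperm.eq_of_pairwise (fun a b _ _ hab hba => absurd hba (asymm hab)) hp1 hp2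

-- when N is not a prime power nothing passes A's test
lemma filter_eq_nil {N : Int} (hN : 2 ≤ N)
    (hnp : ∀ (P K : Nat), P.Prime → 1 ≤ K → N ≠ (P : Int) ^ K) :
    (PySem.List.pyRange 2 (N+1) 1).filter (pvCondA N) = [] := by
  rw [List.filter_eq_nil_iff]
  intro q hq hcond
  rw [PySem.List.mem_pyRange_one] at hq
  rw [pvCondA, Bool.and_eq_true] at hcond
  obtain ⟨hsome, hdec⟩ := hcond
  rw [Option.isSome_iff_exists] at hsome
  obtain ⟨⟨pp, kk⟩, hpk⟩ := hsome
  obtain ⟨Q, a, hQ, ha1, _, _, hxQ⟩ := ipp_some_elim (by omega) hpk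
  obtain ⟨j, hj1, hj⟩ := (powCond_iff (by omega) hN).1 (of_decide_eq_true hdec)
  refine hnp Q (a*j) hQ ?_ ?_
  · calc 1 = 1 * 1 := (mul_one 1).symm
    _ ≤ a * j := Nat.mul_le_mul ha1 hj1
  · rw [pow_mul, ← hxQ, hj]

lemma main_equiv (N : Int) : factorizations N = factorizations_alt N := by
  by_cases hN2 : N < 2
  · unfold factorizations factorizations_alt
    rw [if_pos hN2, PySem.List.pyRange_one_eq_nil (by omega)]
    rfl
  · rw [not_lt] at hN2
    have hM2 : 2 ≤ ((N.toNat.minFac : Nat) : Int) := by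
      have := (Nat.minFac_prime (show N.toNat ≠ 1 by omega)).two_le
      omega
    obtain ⟨e, r, heq, hfac, hr0, hnd⟩ :=
      divOutA_spec ((N.toNat.minFac : Nat) : Int) hM2 N.toNat 0 N (by omega) le_rfl
    rw [factorizations_eq_filter_map]
    unfold factorizations_alt
    rw [if_neg (by omega)]
    simp only [spfLoop_eval N hN2, extractB_eq_divOutA, heq, zero_add]
    by_cases hr : r = 1
    · subst hr
      have hPm : (N.toNat.minFac).Prime := Nat.minFac_prime (by omega)
      have he1 : 1 ≤ e := by
        rcases Nat.eq_zero_or_pos e with h0 | h1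
        · rw [h0] at hfac; simp at hfac; omega
        · exact h1
      have hNP : N = ((N.toNat.minFac : Nat) : Int) ^ e := by
        conv_lhs => rw [hfac]
        rw [mul_one]
      rw [if_neg (by simp)]
      rw [filter_eq_powers hN2 hPm he1 hNP, List.map_map]
      apply List.map_congr_left
      intro j hj
      rw [List.mem_filter, PySem.List.mem_pyRange_one] at hj
      obtain ⟨⟨hj1, hjK⟩, hjdvd⟩ := hj
      have hdvdI : j ∣ ((e : Nat) : Int) :=
        (PySem.Int.mod_eq_zero_iff_dvd _ _).1 (of_decide_eq_true hjdvd)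
      have hdvdN : j.toNat ∣ e := by
        have := dvd_toNat_of_dvd (by omega) (by omega : (0:Int) < ((e:Nat):Int)) hdvdI
        simpa using this
      have hq2 : (2:Int) ≤ ((N.toNat.minFac : Nat) : Int) ^ j.toNat := by
        calc (2:Int) ≤ ((N.toNat.minFac : Nat) : Int) := hM2
        _ = _^1 := (pow_one _).symm
        _ ≤ _^j.toNat := pow_le_pow_right₀ (by omega) (by omega)
      have hpow : (((N.toNat.minFac : Nat) : Int) ^ j.toNat) ^ (e / j.toNat) = N := by
        rw [← pow_mul, Nat.mul_div_cancel' hdvdN]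
        exact hNP.symm
      have hmA := powLoopA_of_pow_eq hq2 hN2 hpow
      simp only [Function.comp_apply, hmA]
      have hjj : j = ((j.toNat : Nat) : Int) := by omega
      rw [hjj, PySem.Int.floordiv_natCast]
      simp
    · rw [if_pos (by simpa using hr)]
      rw [filter_eq_nil hN2 ?_]
      · simp
      · intro P K hPp hK1 hNP
        have hmf := minFac_of_eq_pow hPp hK1 hNP
        have hN' : ((N.toNat.minFac : Nat) : Int) ^ e * r = ((N.toNat.minFac : Nat) : Int) ^ K * 1 := by
          conv_lhs => rw [← hfac]
          rw [hmf, hNP, mul_one]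
        have hone : ¬ (((N.toNat.minFac : Nat) : Int) ∣ (1:Int)) := by
          intro hd
          have h1 := Int.le_of_dvd one_pos hd
          omega
        obtain ⟨_, hr1⟩ := pow_mul_unique hM2 hN' hnd hone
        exact hr hr1




-- ===== VERDICT (by name: the statement is the Claim_ definition above) =====
theorem factorizations_spec : Claim_equal_factorizations := by
  intro N _
  unfold Spec_factorizations
  exact main_equiv N
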